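-- pv_equiv track=rewrite | github.com/syurskyi/Algorithms_and_Data_Structure | _algorithms_challenges/leetcode/LeetcodePythonProject/leetcode_0751_0800/LeetCode777_SwapAdjacentInLRString.py | canTransform_bfs_TLE
-- ===== SOURCE A (Python) =====
-- def canTransform_bfs_TLE(start, end):
--     """
--     :type start: str
--     :type end: str
--     :rtype: bool
--     """
--     visited = set([start])
--     queue = [start]
--     while queue:
--         s = queue.pop()
--         if s == end:
--             return True
--         for i in range(len(s)-1):
--             if s[i:i+2] in ('XL', 'RX'):
--                 newS = s[:i]+s[i:i+2][::-1]+s[i+2:]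
--                 if newS not in visited:
--                     visited.add(newS)
--                     queue.append(newS)
--     return False
-- ===== SOURCE B (Python) =====
-- def canTransform_bfs_TLE(start, end):
--     # O(n) check: non-'X' characters must appear in the same order; an 'L' may only
--     # move left (index in end <= index in start), an 'R' only right, any other
--     # character is immovable (indices must be equal).
--     if len(start) != len(end):
--         return False
--     s_tokens = [(c, i) for i, c in enumerate(start) if c != 'X']
--     e_tokens = [(c, i) for i, c in enumerate(end) if c != 'X']
--     if len(s_tokens) != len(e_tokens):
--         return False
--     for (cs, i), (ce, j) in zip(s_tokens, e_tokens):
--         if cs != ce: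
--             return False
--         if cs == 'L':
--             if i < j:
--                 return False
--         elif cs == 'R':
--             if i > j:
--                 return False
--         else:
--             if i != j:
--                 return False
--     return True
-- ===== Notes on version B (the rewrite author's own statement) =====
-- stated objective: alternative
-- what changed: Replaces the BFS/DFS search over all strings reachable by 'XL'->'LX' / 'RX'->'XR' swaps (worst-case exponential) with a single linear pass: strip the 'X's and compare the remaining characters pairwise, requiring each 'L' to move only left (index in end <= index in start), each 'R' only right, and any other character to stay fixed.
import Mathlib
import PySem

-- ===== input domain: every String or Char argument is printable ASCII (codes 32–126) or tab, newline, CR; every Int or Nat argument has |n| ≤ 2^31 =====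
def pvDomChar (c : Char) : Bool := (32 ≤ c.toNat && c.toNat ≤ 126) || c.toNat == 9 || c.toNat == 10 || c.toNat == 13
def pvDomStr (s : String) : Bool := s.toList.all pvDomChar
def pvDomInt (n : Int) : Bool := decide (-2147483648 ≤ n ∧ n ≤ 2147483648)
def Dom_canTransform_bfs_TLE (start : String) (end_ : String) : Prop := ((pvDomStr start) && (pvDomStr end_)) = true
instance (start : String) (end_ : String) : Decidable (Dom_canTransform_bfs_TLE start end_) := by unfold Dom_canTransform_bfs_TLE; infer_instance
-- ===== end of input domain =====

-- B replaces A's search over all strings reachable by swaps with a single linear pass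
-- (strip the 'X's, compare the remaining characters and their index constraints).

-- ===== PORT A =====
-- newS = s[:i] + s[i:i+2][::-1] + s[i+2:]   (s[i:i+2][::-1] is the reverse of the
-- two-char slice — PySem.List.slice?_none_none_neg_one)
def pvNewS (s : List Char) (i : Int) : List Char :=
  PySem.List.slice s none (some i) ++
    (PySem.List.slice s (some i) (some (i + 2))).reverse ++
    PySem.List.slice s (some (i + 2)) none

-- the inner 'for i in range(len(s)-1)' loop, threading (visited, queue)
def pvExpand (s : List Char) (st : PySem.Set (List Char) × List (List Char)) :
    PySem.Set (List Char) × List (List Char) :=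
  (PySem.List.pyRange 0 ((s.length : Int) - 1) 1).foldl
    (fun vq i =>
      if PySem.List.slice s (some i) (some (i + 2)) = ['X', 'L'] ∨
          PySem.List.slice s (some i) (some (i + 2)) = ['R', 'X'] then
        if !(PySem.Set.contains vq.1 (pvNewS s i)) then
          (PySem.Set.add vq.1 (pvNewS s i), vq.2 ++ [pvNewS s i])
        else vq
      else vq)
    st

-- the 'while queue:' loop; the fuel only guards termination (it is proved never to
-- run out: each iteration enlarges visited, which holds distinct permutations of start)
def pvLoop : Nat → PySem.Set (List Char) → List (List Char) → List Char → Bool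
  | 0, _, _, _ => false
  | fuel + 1, visited, queue, e =>
    match PySem.List.pop? queue (-1) with   -- s = queue.pop()
    | none => false                          -- while queue: exhausted
    | some (s, rest) =>
      if s = e then true
      else
        let vq := pvExpand s (visited, rest)
        pvLoop fuel vq.1 vq.2 e

def canTransform_bfs_TLE (start : String) (end_ : String) : Bool :=
  pvLoop (Nat.factorial start.toList.length + 1)
    (PySem.Set.ofList [start.toList]) [start.toList] end_.toList

-- ===== PORT B =====
-- [(c, i) for i, c in enumerate(s) if c != 'X']
def pvTokens (s : List Char) : List (Char × Int) :=
  ((PySem.List.enumerate s 0).filter (fun p => p.2 != 'X')).map (fun p => (p.2, p.1))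

-- the zip loop with its early returns
def pvCheck : List (Char × Int) → List (Char × Int) → Bool
  | (cs, i) :: ss, (ce, j) :: es =>
      if cs ≠ ce then false
      else if cs = 'L' then (if i < j then false else pvCheck ss es)
      else if cs = 'R' then (if j < i then false else pvCheck ss es)
      else (if i ≠ j then false else pvCheck ss es)
  | _, _ => true

def canTransform_bfs_TLE_alt (start : String) (end_ : String) : Bool :=
  if start.toList.length ≠ end_.toList.length then false
  else
    let st := pvTokens start.toList
    let et := pvTokens end_.toList
    if st.length ≠ et.length then false
    else pvCheck st et

-- ===== PRECONDITION & SPEC =====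
def Spec_canTransform_bfs_TLE (start : String) (end_ : String) (out : Bool) : Prop := out = canTransform_bfs_TLE_alt start end_
instance (start : String) (end_ : String) (out : Bool) : Decidable (Spec_canTransform_bfs_TLE start end_ out) := by unfold Spec_canTransform_bfs_TLE; infer_instance

-- ===== CLAIM (what is proved, stated in full; the proofs are below) =====
def Claim_equal_canTransform_bfs_TLE : Prop := ∀ (start : String) (end_ : String), Dom_canTransform_bfs_TLE start end_ → Spec_canTransform_bfs_TLE start end_ (canTransform_bfs_TLE start end_)

-- ===== LEMMAS AND PROOFS =====

-- the non-'X' characters of s with their absolute positions, starting at base index k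
def pvNonX : Int → List Char → List (Char × Int)
  | _, [] => []
  | k, c :: cs => if c = 'X' then pvNonX (k + 1) cs else (c, k) :: pvNonX (k + 1) cs

-- the per-pair constraint B checks ("L only moves left, R only right, others fixed")
def pvOkP (p q : Char × Int) : Prop :=
  p.1 = q.1 ∧ (if p.1 = 'L' then q.2 ≤ p.2 else if p.1 = 'R' then p.2 ≤ q.2 else p.2 = q.2)

-- one swap A performs: "XL" -> "LX" or "RX" -> "XR"
inductive PvStep : List Char → List Char → Prop
  | xl (a b : List Char) : PvStep (a ++ 'X' :: 'L' :: b) (a ++ 'L' :: 'X' :: b)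
  | rx (a b : List Char) : PvStep (a ++ 'R' :: 'X' :: b) (a ++ 'X' :: 'R' :: b)

def PvReach : List Char → List Char → Prop := Relation.ReflTransGen PvStep

-- ---- pvNonX structure ----
theorem pvTokens_eq (s : List Char) : ∀ k, ((PySem.List.enumerate s k).filter
    (fun p => p.2 != 'X')).map (fun p => (p.2, p.1)) = pvNonX k s := by
  induction s with
  | nil => intro k; simp [PySem.List.enumerate_nil, pvNonX]
  | cons c cs ih =>
    intro k
    by_cases h : c = 'X' <;>
      simp [PySem.List.enumerate_cons, pvNonX, h, ih (k + 1)]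

theorem pvNonX_append (a b : List Char) : ∀ k,
    pvNonX k (a ++ b) = pvNonX k a ++ pvNonX (k + (a.length : Int)) b := by
  induction a with
  | nil => intro k; simp [pvNonX]
  | cons c cs ih =>
    intro k
    by_cases h : c = 'X' <;>
      simp [pvNonX, h, ih (k + 1)] <;> ring_nf

theorem pvNonX_replicateX (g : Nat) : ∀ (k : Int) (l : List Char),
    pvNonX k (List.replicate g 'X' ++ l) = pvNonX (k + (g : Int)) l := by
  induction g with
  | zero => intro k l; simp
  | succ g ih =>
    intro k l
    simp only [List.replicate_succ, List.cons_append, pvNonX, ih (k + 1)]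
    norm_num
    ring_nf

theorem pvNonX_lb (s : List Char) : ∀ k x, x ∈ pvNonX k s → k ≤ x.2 := by
  induction s with
  | nil => intro k x h; simp [pvNonX] at h
  | cons c cs ih =>
    intro k x h
    by_cases hc : c = 'X'
    · simp only [pvNonX, if_pos hc] at h
      have := ih (k + 1) x h; omega
    · simp only [pvNonX, if_neg hc, List.mem_cons] at h
      rcases h with h | h
      · subst h; simp
      · have := ih (k + 1) x h; omega

theorem pvNonX_pairwise (s : List Char) : ∀ k,
    (pvNonX k s).Pairwise (fun a b => a.2 < b.2) := by
  induction s with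
  | nil => intro k; simp [pvNonX]
  | cons c cs ih =>
    intro k
    by_cases hc : c = 'X'
    · simpa [pvNonX, hc] using ih (k + 1)
    · simp only [pvNonX, if_neg hc, List.pairwise_cons]
      exact ⟨fun x hx => by have := pvNonX_lb cs (k + 1) x hx; simp; omega, ih (k + 1)⟩

theorem pvNonX_head (s : List Char) : ∀ k c i P, pvNonX k s = (c, i) :: P →
    ∃ g r, s = List.replicate g 'X' ++ c :: r ∧ i = k + (g : Int) ∧
      P = pvNonX (i + 1) r ∧ c ≠ 'X' := by
  induction s with
  | nil => intro k c i P h; simp [pvNonX] at h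
  | cons d cs ih =>
    intro k c i P h
    by_cases hd : d = 'X'
    · simp only [pvNonX, if_pos hd] at h
      obtain ⟨g, r, h1, h2, h3, h4⟩ := ih (k + 1) c i P h
      exact ⟨g + 1, r, by simp [h1, hd, List.replicate_succ], by push_cast; omega, h3, h4⟩
    · simp only [pvNonX, if_neg hd] at h
      obtain ⟨⟨hc, hi⟩, hP⟩ : ((d = c ∧ k = i) ∧ pvNonX (k+1) cs = P) := by
        constructor
        · constructor <;> [exact congrArg Prod.fst (List.head_eq_of_cons_eq h);
                          exact congrArg Prod.snd (List.head_eq_of_cons_eq h)]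
        · exact List.tail_eq_of_cons_eq h
      exact ⟨0, cs, by simp [hc], by omega, by rw [← hP, ← hi], hc ▸ hd⟩

theorem pvNonX_noX_length (m : List Char) : ∀ k, 'X' ∉ m →
    (pvNonX k m).length = m.length := by
  induction m with
  | nil => intro k _; simp [pvNonX]
  | cons c cs ih =>
    intro k h
    simp only [List.mem_cons, not_or] at h
    simp [pvNonX, Ne.symm h.1, ih (k + 1) h.2]

theorem pvNonX_length_le (s : List Char) : ∀ k, (pvNonX k s).length ≤ s.length := by
  induction s with
  | nil => intro k; simp [pvNonX]
  | cons c cs ih =>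
    intro k
    by_cases hc : c = 'X'
    · simp only [pvNonX, if_pos hc, List.length_cons]
      exact Nat.le_succ_of_le (ih (k + 1))
    · simp only [pvNonX, if_neg hc, List.length_cons]
      exact Nat.succ_le_succ (ih (k + 1))

theorem pvFirstX (s : List Char) : 'X' ∈ s → ∃ m r, s = m ++ 'X' :: r ∧ 'X' ∉ m := by
  induction s with
  | nil => simp
  | cons c cs ih =>
    intro h
    by_cases hc : c = 'X'
    · exact ⟨[], cs, by simp [hc], by simp⟩
    · have hmem : 'X' ∈ cs := by
        rcases List.mem_cons.1 h with h' | h'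
        · exact absurd h'.symm hc
        · exact h'
      obtain ⟨m, r, h1, h2⟩ := ih hmem
      refine ⟨c :: m, r, by simp [h1], ?_⟩
      simp only [List.mem_cons, not_or]
      exact ⟨fun h' => hc h'.symm, h2⟩

-- ---- B's check vs the Forall₂ condition ----
theorem pvCheck_cons (cs ce : Char) (i j : Int) (ps qs : List (Char × Int)) :
    pvCheck ((cs,i)::ps) ((ce,j)::qs) = true ↔ (pvOkP (cs,i) (ce,j) ∧ pvCheck ps qs = true) := by
  show (if cs ≠ ce then false
        else if cs = 'L' then (if i < j then false else pvCheck ps qs)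
        else if cs = 'R' then (if j < i then false else pvCheck ps qs)
        else (if i ≠ j then false else pvCheck ps qs)) = true ↔ _
  unfold pvOkP
  split_ifs <;> (try simp_all) <;> (intro _; assumption)

theorem pvCheck_iff (P : List (Char × Int)) : ∀ Q, P.length = Q.length →
    (pvCheck P Q = true ↔ List.Forall₂ pvOkP P Q) := by
  induction P with
  | nil =>
    intro Q h
    cases Q with
    | nil => simp [pvCheck]
    | cons q qs => simp at h
  | cons p ps ih =>
    intro Q h
    cases Q with
    | nil => simp at h
    | cons q qs =>
      obtain ⟨cs, i⟩ := p; obtain ⟨ce, j⟩ := q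
      simp only [List.length_cons, Nat.succ.injEq] at h
      rw [List.forall₂_cons, pvCheck_cons, ih qs h]

-- ---- reachability: generic facts ----
theorem pvStep_cons {u v : List Char} (c : Char) (h : PvStep u v) :
    PvStep (c :: u) (c :: v) := by
  cases h with
  | xl a b => exact PvStep.xl (c :: a) b
  | rx a b => exact PvStep.rx (c :: a) b

theorem pvReach_cons {u v : List Char} (c : Char) (h : PvReach u v) :
    PvReach (c :: u) (c :: v) := by
  induction h with
  | refl => exact Relation.ReflTransGen.refl
  | tail _ hstep ih => exact ih.tail (pvStep_cons c hstep)

theorem pvStep_length {u v : List Char} (h : PvStep u v) : u.length = v.length := by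
  cases h <;> simp

theorem pvStep_perm {u v : List Char} (h : PvStep u v) : u.Perm v := by
  cases h with
  | xl a b => exact (List.Perm.append_left a (List.Perm.swap 'L' 'X' b))
  | rx a b => exact (List.Perm.append_left a (List.Perm.swap 'X' 'R' b))

theorem pvMoveL (g : Nat) (r : List Char) :
    PvReach (List.replicate g 'X' ++ 'L' :: r) ('L' :: List.replicate g 'X' ++ r) := by
  induction g with
  | zero => simp; exact Relation.ReflTransGen.refl
  | succ g ih =>
    have step1 : PvReach ('X' :: (List.replicate g 'X' ++ 'L' :: r))
        ('X' :: 'L' :: List.replicate g 'X' ++ r) := by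
      have := pvReach_cons 'X' ih
      simpa using this
    have step2 : PvStep ('X' :: 'L' :: List.replicate g 'X' ++ r)
        ('L' :: 'X' :: List.replicate g 'X' ++ r) := PvStep.xl [] _
    have hall : PvReach ('X' :: (List.replicate g 'X' ++ 'L' :: r))
        ('L' :: 'X' :: List.replicate g 'X' ++ r) := step1.tail step2
    simpa [List.replicate_succ] using hall

theorem pvMoveR (p : Nat) (r : List Char) :
    PvReach (List.replicate p 'R' ++ 'X' :: r) ('X' :: List.replicate p 'R' ++ r) := by
  induction p with
  | zero => simp; exact Relation.ReflTransGen.refl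
  | succ p ih =>
    have step1 : PvReach ('R' :: (List.replicate p 'R' ++ 'X' :: r))
        ('R' :: 'X' :: List.replicate p 'R' ++ r) := by
      have := pvReach_cons 'R' ih
      simpa using this
    have step2 : PvStep ('R' :: 'X' :: List.replicate p 'R' ++ r)
        ('X' :: 'R' :: List.replicate p 'R' ++ r) := PvStep.rx [] _
    have hall : PvReach ('R' :: (List.replicate p 'R' ++ 'X' :: r))
        ('X' :: 'R' :: List.replicate p 'R' ++ r) := step1.tail step2
    simpa [List.replicate_succ] using hall

-- ---- forward direction: every reachable string satisfies the condition ----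
theorem pvOkP_refl (p : Char × Int) : pvOkP p p := by
  unfold pvOkP; split_ifs <;> simp

theorem pvForall₂_mid {P A B : List (Char × Int)} {x x' : Char × Int}
    (h : List.Forall₂ pvOkP P (A ++ x :: B)) (hx : ∀ p, pvOkP p x → pvOkP p x') :
    List.Forall₂ pvOkP P (A ++ x' :: B) := by
  have h1 := List.forall₂_take_append P A (x :: B) h
  have h2 := List.forall₂_drop_append P A (x :: B) h
  rcases (List.forall₂_cons_right_iff).1 h2 with ⟨p, P2', hpx, hF2, hd⟩
  have hall : List.Forall₂ pvOkP (List.take A.length P ++ p :: P2') (A ++ x' :: B) :=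
    List.rel_append h1 (List.Forall₂.cons (hx p hpx) hF2)
  rwa [← hd, List.take_append_drop] at hall

theorem pvNonX_skipX (a b : List Char) (c : Char) (hc : c ≠ 'X') :
    pvNonX 0 (a ++ 'X' :: c :: b)
      = pvNonX 0 a ++ (c, (a.length : Int) + 1) :: pvNonX ((a.length : Int) + 2) b := by
  rw [pvNonX_append]
  simp only [pvNonX, if_neg hc]
  norm_num
  ring_nf

theorem pvNonX_midc (a b : List Char) (c : Char) (hc : c ≠ 'X') :
    pvNonX 0 (a ++ c :: 'X' :: b)
      = pvNonX 0 a ++ (c, (a.length : Int)) :: pvNonX ((a.length : Int) + 2) b := by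
  rw [pvNonX_append]
  simp only [pvNonX, if_neg hc]
  norm_num
  ring_nf

theorem pvCond_step {s u u' : List Char} (hst : PvStep u u')
    (h : List.Forall₂ pvOkP (pvNonX 0 s) (pvNonX 0 u)) :
    List.Forall₂ pvOkP (pvNonX 0 s) (pvNonX 0 u') := by
  cases hst with
  | xl a b =>
    rw [pvNonX_skipX a b 'L' (by decide)] at h
    rw [pvNonX_midc a b 'L' (by decide)]
    refine pvForall₂_mid h ?_
    intro p hp
    obtain ⟨h1, h2⟩ := hp
    refine ⟨h1, ?_⟩
    simp only [h1] at *
    split_ifs at h2 ⊢ ; simp_all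
    all_goals omega
  | rx a b =>
    rw [pvNonX_midc a b 'R' (by decide)] at h
    rw [pvNonX_skipX a b 'R' (by decide)]
    refine pvForall₂_mid h ?_
    intro p hp
    obtain ⟨h1, h2⟩ := hp
    refine ⟨h1, ?_⟩
    simp only [h1] at *
    split_ifs at h2 ⊢ <;> simp_all
    all_goals omega

theorem pvReach_cond {s t : List Char} (h : PvReach s t) :
    s.length = t.length ∧ List.Forall₂ pvOkP (pvNonX 0 s) (pvNonX 0 t) := by
  induction h with
  | refl => exact ⟨rfl, List.forall₂_same.2 (fun x _ => pvOkP_refl x)⟩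
  | tail _ hstep ih =>
    exact ⟨ih.1.trans (pvStep_length hstep), pvCond_step hstep ih.2⟩

-- ---- backward direction (sufficiency): the condition implies reachability ----
theorem pvAllR (m : List Char) : ∀ (k : Int) (Q : List (Char × Int)),
    (∀ x ∈ m, x ≠ 'X') → (∀ x ∈ Q, k + 1 ≤ x.2) → Q.Pairwise (fun a b => a.2 < b.2) →
    List.Forall₂ pvOkP (pvNonX k m) Q → ∀ x ∈ m, x = 'R' := by
  induction m with
  | nil => intro k Q _ _ _ _ x hx; simp at hx
  | cons c cs ih =>
    intro k Q hX hlb hpw hF x hx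
    have hcX : c ≠ 'X' := hX c (List.mem_cons_self)
    rw [show pvNonX k (c :: cs) = (c, k) :: pvNonX (k + 1) cs from by
      simp [pvNonX, hcX]] at hF
    rcases (List.forall₂_cons_left_iff).1 hF with ⟨q, Q', hok, hF', hQ⟩
    subst hQ
    have hq : k + 1 ≤ q.2 := hlb q List.mem_cons_self
    have hcR : c = 'R' := by
      obtain ⟨h1, h2⟩ := hok
      by_cases hL : c = 'L'
      · rw [if_pos hL] at h2; omega
      · by_cases hR : c = 'R'
        · exact hR
        · rw [if_neg hL, if_neg hR] at h2; omega
    rcases List.mem_cons.1 hx with h | h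
    · exact h.trans hcR
    · refine ih (k + 1) Q' (fun y hy => hX y (List.mem_cons_of_mem _ hy)) ?_
        (List.Pairwise.of_cons hpw) hF' x h
      intro y hy
      have := (List.pairwise_cons.1 hpw).1 y hy
      omega

theorem pvShiftR (p : Nat) : ∀ (k : Int) (Q : List (Char × Int)),
    (∀ x ∈ Q, k + 1 ≤ x.2) → Q.Pairwise (fun a b => a.2 < b.2) →
    List.Forall₂ pvOkP (pvNonX k (List.replicate p 'R')) Q →
    List.Forall₂ pvOkP (pvNonX (k + 1) (List.replicate p 'R')) Q := by
  induction p with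
  | zero => intro k Q _ _ hF; simpa [pvNonX] using hF
  | succ p ih =>
    intro k Q hlb hpw hF
    rw [show pvNonX k (List.replicate (p+1) 'R') = ('R', k) :: pvNonX (k + 1) (List.replicate p 'R')
        from by simp [List.replicate_succ, pvNonX]] at hF
    rcases (List.forall₂_cons_left_iff).1 hF with ⟨q, Q', hok, hF', hQ⟩
    subst hQ
    have hq : k + 1 ≤ q.2 := hlb q List.mem_cons_self
    rw [show pvNonX (k+1) (List.replicate (p+1) 'R') = ('R', k+1) :: pvNonX (k + 2) (List.replicate p 'R')
        from by simp [List.replicate_succ, pvNonX]; ring_nf]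
    refine List.Forall₂.cons ⟨hok.1, ?_⟩ ?_
    · simpa using hq
    · have := ih (k + 1) Q' (fun y hy => by
        have := (List.pairwise_cons.1 hpw).1 y hy; omega) (List.Pairwise.of_cons hpw) hF'
      convert this using 2
      ring


theorem pvSuff (n : Nat) : ∀ (k : Int) (s t : List Char), s.length = n → t.length = n →
    List.Forall₂ pvOkP (pvNonX k s) (pvNonX k t) → PvReach s t := by
  induction n with
  | zero =>
    intro k s t hs ht _
    rw [List.length_eq_zero_iff] at hs ht
    subst hs; subst ht
    exact Relation.ReflTransGen.refl
  | succ n ih =>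
    intro k s t hs ht hF
    cases s with
    | nil => simp at hs
    | cons c s' =>
    cases t with
    | nil => simp at ht
    | cons d t' =>
    simp only [List.length_cons, Nat.succ.injEq] at hs ht
    by_cases hcX : c = 'X' <;> by_cases hdX : d = 'X'
    · -- both heads X
      subst hcX; subst hdX
      rw [show pvNonX k ('X' :: s') = pvNonX (k + 1) s' from by simp [pvNonX],
          show pvNonX k ('X' :: t') = pvNonX (k + 1) t' from by simp [pvNonX]] at hF
      exact pvReach_cons 'X' (ih (k + 1) s' t' hs ht hF)
    · -- s head X, t head d ≠ X : d must be 'L'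
      subst hcX
      have hts : pvNonX k (d :: t') = (d, k) :: pvNonX (k + 1) t' := by
        simp [pvNonX, hdX]
      rw [hts] at hF
      rcases (List.forall₂_cons_right_iff).1 hF with ⟨p, P', hok, hF', hsp⟩
      have hpmem : p ∈ pvNonX k ('X' :: s') := by rw [hsp]; exact List.mem_cons_self
      have hplb : k + 1 ≤ p.2 := by
        rw [show pvNonX k ('X' :: s') = pvNonX (k + 1) s' from by simp [pvNonX]] at hpmem
        exact pvNonX_lb s' (k + 1) p hpmem
      have hpL : p.1 = 'L' := by
        obtain ⟨h1, h2⟩ := hok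
        by_cases hL : p.1 = 'L'
        · exact hL
        · by_cases hR : p.1 = 'R'
          · rw [if_neg hL, if_pos hR] at h2; omega
          · rw [if_neg hL, if_neg hR] at h2; omega
      have hdL : d = 'L' := by
        have h := hok.1; simp only at h; rw [← h]; exact hpL
      obtain ⟨c₁, i⟩ := p
      simp only at hpL hplb
      subst hpL
      obtain ⟨g, r, hdec, hi, hP', -⟩ := pvNonX_head ('X' :: s') k 'L' i P' hsp
      have hg : 1 ≤ g := by omega
      have hreach1 : PvReach ('X' :: s') ('L' :: List.replicate g 'X' ++ r) := by
        rw [hdec]; exact pvMoveL g r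
      have hlen1 : (List.replicate g 'X' ++ r).length = n := by
        have := congrArg List.length hdec
        simp at this ⊢
        omega
      have hF2 : List.Forall₂ pvOkP (pvNonX (k + 1) (List.replicate g 'X' ++ r))
          (pvNonX (k + 1) t') := by
        rw [pvNonX_replicateX]
        rw [show k + 1 + (g : Int) = i + 1 by omega, ← hP']
        exact hF'
      have hreach2 : PvReach (List.replicate g 'X' ++ r) t' :=
        ih (k + 1) _ t' hlen1 ht hF2
      rw [hdL]
      exact hreach1.trans (pvReach_cons 'L' hreach2)
    · -- s head c ≠ X, t head X : c must be 'R'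
      subst hdX
      have hss : pvNonX k (c :: s') = (c, k) :: pvNonX (k + 1) s' := by
        simp [pvNonX, hcX]
      rw [hss, show pvNonX k ('X' :: t') = pvNonX (k + 1) t' from by simp [pvNonX]] at hF
      rcases (List.forall₂_cons_left_iff).1 hF with ⟨q, Q', hok, hF', hT⟩
      have hqmem : q ∈ pvNonX (k + 1) t' := by rw [hT]; exact List.mem_cons_self
      have hqlb : k + 1 ≤ q.2 := pvNonX_lb t' (k + 1) q hqmem
      have hcR : c = 'R' := by
        obtain ⟨h1, h2⟩ := hok
        by_cases hL : c = 'L'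
        · rw [if_pos hL] at h2; simp only at h2; omega
        · by_cases hR : c = 'R'
          · exact hR
          · rw [if_neg hL, if_neg hR] at h2; simp only at h2; omega
      -- s contains an 'X'
      have hXs : 'X' ∈ c :: s' := by
        by_contra hno
        have hlenF : (pvNonX k (c :: s')).length = (pvNonX (k + 1) t').length := by
          rw [hss]
          exact (List.Forall₂.length_eq hF)
        have h1 : (pvNonX k (c :: s')).length = n + 1 := by
          rw [pvNonX_noX_length _ k hno]; simp; omega
        have h2 : (pvNonX (k + 1) t').length ≤ n := by
          have := pvNonX_length_le t' (k + 1); omega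
        omega
      obtain ⟨m, r, hdec, hmX⟩ := pvFirstX _ hXs
      have hm : m ≠ [] := by
        intro h; rw [h] at hdec; simp at hdec; exact hcX hdec.1
      have hXm : ∀ x ∈ m, x ≠ 'X' := fun x hx h => hmX (h ▸ hx)
      have hFall : List.Forall₂ pvOkP (pvNonX k (c :: s')) (pvNonX (k + 1) t') := by
        rw [hss, hT]; exact List.Forall₂.cons hok hF'
      have hsplit : pvNonX k (c :: s')
          = pvNonX k m ++ pvNonX (k + (m.length : Int) + 1) r := by
        rw [hdec, pvNonX_append]
        simp [pvNonX]
      rw [hsplit] at hFall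
      have hflip : List.Forall₂ (flip pvOkP) (pvNonX (k + 1) t')
          (pvNonX k m ++ pvNonX (k + (m.length : Int) + 1) r) :=
        List.Forall₂.flip (R := flip pvOkP) hFall
      have h1 := List.forall₂_take_append _ _ _ hflip
      have h2 := List.forall₂_drop_append _ _ _ hflip
      have hQ1 : List.Forall₂ pvOkP (pvNonX k m)
          ((pvNonX (k + 1) t').take (pvNonX k m).length) := List.Forall₂.flip h1
      have hQ2 : List.Forall₂ pvOkP (pvNonX (k + (m.length : Int) + 1) r)
          ((pvNonX (k + 1) t').drop (pvNonX k m).length) := List.Forall₂.flip h2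
      have hlb : ∀ x ∈ (pvNonX (k + 1) t').take (pvNonX k m).length, k + 1 ≤ x.2 :=
        fun x hx => pvNonX_lb t' (k + 1) x (List.mem_of_mem_take hx)
      have hpw : ((pvNonX (k + 1) t').take (pvNonX k m).length).Pairwise
          (fun a b => a.2 < b.2) :=
        List.Pairwise.sublist (List.take_sublist _ _) (pvNonX_pairwise t' (k + 1))
      have hmR : ∀ x ∈ m, x = 'R' := pvAllR m k _ hXm hlb hpw hQ1
      have hrep : m = List.replicate m.length 'R' := List.eq_replicate_of_mem hmR
      have hshift : List.Forall₂ pvOkP (pvNonX (k + 1) (List.replicate m.length 'R'))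
          ((pvNonX (k + 1) t').take (pvNonX k m).length) :=
        pvShiftR m.length k _ hlb hpw (by rw [← hrep]; exact hQ1)
      have hcomb : List.Forall₂ pvOkP (pvNonX (k + 1) (m ++ r)) (pvNonX (k + 1) t') := by
        rw [pvNonX_append,
            ← List.take_append_drop (pvNonX k m).length (pvNonX (k + 1) t')]
        apply List.rel_append
        · rw [← hrep] at hshift
          exact hshift
        · rw [show k + 1 + (m.length : Int) = k + (m.length : Int) + 1 from by ring]
          exact hQ2
      have hlen : (m ++ r).length = n := by
        have := congrArg List.length hdec
        simp at this ⊢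
        omega
      have hreach2 : PvReach (m ++ r) t' := ih (k + 1) (m ++ r) t' hlen ht hcomb
      have hmv : PvReach (m ++ 'X' :: r) ('X' :: m ++ r) := by
        rw [hrep]
        have := pvMoveR m.length r
        simpa using this
      rw [hdec]
      exact hmv.trans (pvReach_cons 'X' hreach2)
    · -- both heads non-X : heads equal, strip
      have hss : pvNonX k (c :: s') = (c, k) :: pvNonX (k + 1) s' := by
        simp [pvNonX, hcX]
      have hts : pvNonX k (d :: t') = (d, k) :: pvNonX (k + 1) t' := by
        simp [pvNonX, hdX]
      rw [hss, hts] at hF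
      rcases List.forall₂_cons.1 hF with ⟨hok, hF'⟩
      have hcd : c = d := hok.1
      subst hcd
      exact pvReach_cons c (ih (k + 1) s' t' hs ht hF')

-- ---- the BFS loop computes reachability ----
theorem pvSlice2 (s : List Char) {i : Int} (h0 : 0 ≤ i) :
    PySem.List.slice s (some i) (some (i + 2)) = (s.drop i.toNat).take 2 := by
  have him : i = (i.toNat : Int) := by omega
  rw [him, show ((i.toNat : Int) + 2) = ((i.toNat : Int) + ((2 : Nat) : Int)) from by norm_num,
     PySem.List.slice_natCast_add]
  simp
  congr 2
  omega

theorem pvDecomp2 {s : List Char} {m : Nat} {c d : Char}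
    (h : (s.drop m).take 2 = [c, d]) :
    s = s.take m ++ c :: d :: s.drop (m + 2) := by
  have htd := List.take_append_drop 2 (s.drop m)
  rw [h, List.drop_drop] at htd
  conv_lhs => rw [← List.take_append_drop m s]
  rw [← htd]
  simp

theorem pvNewS_eq (s : List Char) {i : Int} (h0 : 0 ≤ i) {c d : Char}
    (h : (s.drop i.toNat).take 2 = [c, d]) :
    pvNewS s i = s.take i.toNat ++ d :: c :: s.drop (i.toNat + 2) := by
  unfold pvNewS
  rw [PySem.List.slice_to s h0, PySem.List.slice_from s (by omega : (0:Int) ≤ i + 2),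
      pvSlice2 s h0, h]
  have : (i + 2).toNat = i.toNat + 2 := by omega
  simp [this]

theorem pvNewS_step {s : List Char} {i : Int}
    (hmem : i ∈ PySem.List.pyRange 0 ((s.length : Int) - 1) 1)
    (happ : PySem.List.slice s (some i) (some (i + 2)) = ['X', 'L'] ∨
            PySem.List.slice s (some i) (some (i + 2)) = ['R', 'X']) :
    PvStep s (pvNewS s i) := by
  rcases PySem.List.mem_pyRange_one.1 hmem with ⟨h0, -⟩
  rcases happ with happ | happ <;> rw [pvSlice2 s h0] at happ
  · have hstep := PvStep.xl (s.take i.toNat) (s.drop (i.toNat + 2))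
    rw [← pvDecomp2 happ, ← pvNewS_eq s h0 happ] at hstep
    exact hstep
  · have hstep := PvStep.rx (s.take i.toNat) (s.drop (i.toNat + 2))
    rw [← pvDecomp2 happ, ← pvNewS_eq s h0 happ] at hstep
    exact hstep

theorem pvStep_newS {s y : List Char} (h : PvStep s y) :
    ∃ i, i ∈ PySem.List.pyRange 0 ((s.length : Int) - 1) 1 ∧
      (PySem.List.slice s (some i) (some (i + 2)) = ['X', 'L'] ∨
       PySem.List.slice s (some i) (some (i + 2)) = ['R', 'X']) ∧
      pvNewS s i = y := by
  cases h with
  | xl a b =>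
    have hm : ((a.length : Int)).toNat = a.length := Int.toNat_natCast a.length
    refine ⟨(a.length : Int), ?_, ?_, ?_⟩
    · rw [PySem.List.mem_pyRange_one]
      refine ⟨by positivity, ?_⟩
      simp only [List.length_append, List.length_cons]
      push_cast
      omega
    · left
      rw [pvSlice2 _ (by positivity), hm, List.drop_left]
      rfl
    · have htk : ((a ++ 'X' :: 'L' :: b).drop ((a.length : Int)).toNat).take 2 = ['X', 'L'] := by
        rw [hm, List.drop_left]; rfl
      have hdrop : (a ++ 'X' :: 'L' :: b).drop (a.length + 2) = b := by
        rw [show (a ++ 'X' :: 'L' :: b) = (a ++ ['X', 'L']) ++ b from by simp]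
        exact List.drop_left' (by simp)
      rw [pvNewS_eq _ (by positivity) htk, hm, hdrop, List.take_left]
  | rx a b =>
    have hm : ((a.length : Int)).toNat = a.length := Int.toNat_natCast a.length
    refine ⟨(a.length : Int), ?_, ?_, ?_⟩
    · rw [PySem.List.mem_pyRange_one]
      refine ⟨by positivity, ?_⟩
      simp only [List.length_append, List.length_cons]
      push_cast
      omega
    · right
      rw [pvSlice2 _ (by positivity), hm, List.drop_left]
      rfl
    · have htk : ((a ++ 'R' :: 'X' :: b).drop ((a.length : Int)).toNat).take 2 = ['R', 'X'] := by
        rw [hm, List.drop_left]; rfl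
      have hdrop : (a ++ 'R' :: 'X' :: b).drop (a.length + 2) = b := by
        rw [show (a ++ 'R' :: 'X' :: b) = (a ++ ['R', 'X']) ++ b from by simp]
        exact List.drop_left' (by simp)
      rw [pvNewS_eq _ (by positivity) htk, hm, hdrop, List.take_left]


-- the fold body of pvExpand, named for the invariant lemmas
def pvF (s : List Char) (vq : PySem.Set (List Char) × List (List Char)) (i : Int) :
    PySem.Set (List Char) × List (List Char) :=
  if PySem.List.slice s (some i) (some (i + 2)) = ['X', 'L'] ∨
      PySem.List.slice s (some i) (some (i + 2)) = ['R', 'X'] then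
    if !(PySem.Set.contains vq.1 (pvNewS s i)) then
      (PySem.Set.add vq.1 (pvNewS s i), vq.2 ++ [pvNewS s i])
    else vq
  else vq

theorem pvExpand_eq (s : List Char) (st : PySem.Set (List Char) × List (List Char)) :
    pvExpand s st = (PySem.List.pyRange 0 ((s.length : Int) - 1) 1).foldl (pvF s) st := rfl

theorem pvFold_mono_v (s : List Char) (l : List Int) :
    ∀ st x, x ∈ st.1 → x ∈ (l.foldl (pvF s) st).1 := by
  induction l with
  | nil => intro st x hx; simpa using hx
  | cons i l ih =>
    intro st x hx
    rw [List.foldl_cons]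
    apply ih
    unfold pvF
    split_ifs <;>
      first
        | exact (PySem.Set.mem_add _ _ _).2 (Or.inl hx)
        | exact hx

theorem pvFold_mono_q (s : List Char) (l : List Int) :
    ∀ st x, x ∈ st.2 → x ∈ (l.foldl (pvF s) st).2 := by
  induction l with
  | nil => intro st x hx; simpa using hx
  | cons i l ih =>
    intro st x hx
    rw [List.foldl_cons]
    apply ih
    unfold pvF
    split_ifs <;>
      first
        | exact List.mem_append_left _ hx
        | exact hx

theorem pvFold_v_src (s : List Char) (l : List Int) :
    ∀ st x, x ∈ (l.foldl (pvF s) st).1 → x ∈ st.1 ∨ ∃ i ∈ l,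
      (PySem.List.slice s (some i) (some (i + 2)) = ['X', 'L'] ∨
       PySem.List.slice s (some i) (some (i + 2)) = ['R', 'X']) ∧ x = pvNewS s i := by
  induction l with
  | nil => intro st x hx; exact Or.inl (by simpa using hx)
  | cons i l ih =>
    intro st x hx
    rw [List.foldl_cons] at hx
    rcases ih _ x hx with hx' | ⟨i', hi', happ, hx'⟩
    · unfold pvF at hx'
      split_ifs at hx' with h1 h2
      · rcases (PySem.Set.mem_add _ _ _).1 hx' with h | h
        · exact Or.inl h
        · exact Or.inr ⟨i, List.mem_cons_self, h1, h⟩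
      · exact Or.inl hx'
      · exact Or.inl hx'
    · exact Or.inr ⟨i', List.mem_cons_of_mem _ hi', happ, hx'⟩

theorem pvFold_q_src (s : List Char) (l : List Int) :
    ∀ st x, x ∈ (l.foldl (pvF s) st).2 → x ∈ st.2 ∨ ∃ i ∈ l,
      (PySem.List.slice s (some i) (some (i + 2)) = ['X', 'L'] ∨
       PySem.List.slice s (some i) (some (i + 2)) = ['R', 'X']) ∧ x = pvNewS s i := by
  induction l with
  | nil => intro st x hx; exact Or.inl (by simpa using hx)
  | cons i l ih =>
    intro st x hx
    rw [List.foldl_cons] at hx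
    rcases ih _ x hx with hx' | ⟨i', hi', happ, hx'⟩
    · unfold pvF at hx'
      split_ifs at hx' with h1 h2
      · rcases List.mem_append.1 hx' with h | h
        · exact Or.inl h
        · exact Or.inr ⟨i, List.mem_cons_self, h1, by simpa using h⟩
      · exact Or.inl hx'
      · exact Or.inl hx'
    · exact Or.inr ⟨i', List.mem_cons_of_mem _ hi', happ, hx'⟩

theorem pvFold_qv (s : List Char) (l : List Int) :
    ∀ st, (∀ x ∈ st.2, x ∈ st.1) → ∀ x ∈ (l.foldl (pvF s) st).2, x ∈ (l.foldl (pvF s) st).1 := by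
  induction l with
  | nil => intro st h x hx; simpa using h x (by simpa using hx)
  | cons i l ih =>
    intro st h x hx
    rw [List.foldl_cons] at hx ⊢
    refine ih (pvF s st i) ?_ x hx
    unfold pvF
    split_ifs with h1 h2
    · intro y hy
      rcases List.mem_append.1 hy with hmem | hmem
      · exact (PySem.Set.mem_add _ _ _).2 (Or.inl (h y hmem))
      · exact (PySem.Set.mem_add _ _ _).2 (Or.inr (by simpa using hmem))
    · exact h
    · exact h

theorem pvFold_complete (s : List Char) (l : List Int) :
    ∀ st i, i ∈ l →
      (PySem.List.slice s (some i) (some (i + 2)) = ['X', 'L'] ∨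
       PySem.List.slice s (some i) (some (i + 2)) = ['R', 'X']) →
      pvNewS s i ∈ (l.foldl (pvF s) st).1 := by
  induction l with
  | nil => intro st i hi; simp at hi
  | cons i' l ih =>
    intro st i hi happ
    rw [List.foldl_cons]
    rcases List.mem_cons.1 hi with heq | hmem
    · subst heq
      apply pvFold_mono_v
      unfold pvF
      rw [if_pos happ]
      split_ifs with h2
      · exact (PySem.Set.mem_add _ _ _).2 (Or.inr rfl)
      · simp only [Bool.not_eq_true', Bool.not_eq_false] at h2
        exact (PySem.Set.contains_iff _ _).1 h2
    · exact ih _ i hmem happ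

theorem pvFold_size (s : List Char) (l : List Int) :
    ∀ st, (l.foldl (pvF s) st).1.length + st.2.length
        = st.1.length + (l.foldl (pvF s) st).2.length := by
  induction l with
  | nil => intro st; simp
  | cons i l ih =>
    intro st
    rw [List.foldl_cons]
    have hrec := ih (pvF s st i)
    have hstep : (pvF s st i).1.length + st.2.length
        = st.1.length + (pvF s st i).2.length := by
      unfold pvF
      split_ifs with h1 h2
      · have hnm : pvNewS s i ∉ st.1 := by simpa [PySem.Set.contains_iff] using h2
        have hlen : (PySem.Set.add st.1 (pvNewS s i)).length = st.1.length + 1 := by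
          simp [PySem.Set.add, hnm]
        simp only [hlen, List.length_append, List.length_cons, List.length_nil]
        omega
      · rfl
      · rfl
    omega

theorem pvFold_nodup (s : List Char) (l : List Int) :
    ∀ st, st.1.Nodup → (l.foldl (pvF s) st).1.Nodup := by
  induction l with
  | nil => intro st h; simpa using h
  | cons i l ih =>
    intro st h
    rw [List.foldl_cons]
    refine ih _ ?_
    unfold pvF
    split_ifs
    · exact PySem.Set.nodup_add _ _ h
    · exact h
    · exact h

theorem pvFold_v_in_q (s : List Char) (l : List Int) :
    ∀ st x, x ∈ (l.foldl (pvF s) st).1 → x ∈ st.1 ∨ x ∈ (l.foldl (pvF s) st).2 := by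
  induction l with
  | nil => intro st x hx; exact Or.inl (by simpa using hx)
  | cons i l ih =>
    intro st x hx
    rw [List.foldl_cons] at hx ⊢
    rcases ih _ x hx with hx' | hx'
    · unfold pvF at hx'
      split_ifs at hx' with h1 h2
      · rcases (PySem.Set.mem_add _ _ _).1 hx' with h | h
        · exact Or.inl h
        · refine Or.inr ?_
          apply pvFold_mono_q
          unfold pvF
          rw [if_pos h1, if_pos h2]
          exact List.mem_append_right _ (by simpa using h)
      · exact Or.inl hx'
      · exact Or.inl hx'
    · exact Or.inr hx'

theorem pvCard {V : List (List Char)} {s0 : List Char} (hnd : V.Nodup)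
    (hperm : ∀ x ∈ V, x.Perm s0) : V.length ≤ Nat.factorial s0.length := by
  have hsub : V.toFinset ⊆ s0.permutations.toFinset := by
    intro x hx
    rw [List.mem_toFinset] at hx ⊢
    exact List.mem_permutations.2 (hperm x hx)
  calc V.length = V.toFinset.card := (List.toFinset_card_of_nodup hnd).symm
    _ ≤ s0.permutations.toFinset.card := Finset.card_le_card hsub
    _ ≤ s0.permutations.length := List.toFinset_card_le _
    _ = Nat.factorial s0.length := List.length_permutations s0

theorem pvClosed {V : List (List Char)} (hcl : ∀ x ∈ V, ∀ y, PvStep x y → y ∈ V) :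
    ∀ x z, x ∈ V → PvReach x z → z ∈ V := by
  intro x z hx h
  induction h with
  | refl => exact hx
  | tail _ hstep ih => exact hcl _ ih _ hstep

theorem pvLoop_true (fuel : Nat) : ∀ (V : PySem.Set (List Char)) (Q : List (List Char))
    (e s0 : List Char), (∀ x ∈ Q, PvReach s0 x) →
    pvLoop fuel V Q e = true → PvReach s0 e := by
  induction fuel with
  | zero => intro V Q e s0 _ h; simp [pvLoop] at h
  | succ fuel ih =>
    intro V Q e s0 hQ h
    rcases List.eq_nil_or_concat' Q with rfl | ⟨q, x, rfl⟩
    · simp [pvLoop, PySem.List.pop?] at h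
    · simp only [pvLoop, PySem.List.pop?_last] at h
      by_cases hxe : x = e
      · exact hxe ▸ hQ x (List.mem_append_right _ (List.mem_singleton.2 rfl))
      · rw [if_neg hxe] at h
        refine ih _ _ e s0 ?_ h
        intro y hy
        rw [pvExpand_eq] at hy
        rcases pvFold_q_src x _ (V, q) y hy with hy' | ⟨i, hi, happ, rfl⟩
        · exact hQ y (List.mem_append_left _ hy')
        · exact (hQ x (List.mem_append_right _ (List.mem_singleton.2 rfl))).tail
            (pvNewS_step hi happ)

theorem pvLoop_false (fuel : Nat) : ∀ (V : PySem.Set (List Char)) (Q : List (List Char))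
    (e s0 : List Char),
    (∀ x ∈ Q, x ∈ V) → V.Nodup → (∀ x ∈ V, x.Perm s0) →
    (∀ x ∈ V, x ∉ Q → x ≠ e ∧ ∀ y, PvStep x y → y ∈ V) →
    Nat.factorial s0.length + 1 + Q.length ≤ fuel + V.length →
    pvLoop fuel V Q e = false → ∀ x ∈ V, ¬ PvReach x e := by
  induction fuel with
  | zero =>
    intro V Q e s0 _ hnd hperm _ hfuel _
    have hV := pvCard hnd hperm
    omega
  | succ fuel ih =>
    intro V Q e s0 hQV hnd hperm hcl hfuel hloop
    rcases List.eq_nil_or_concat' Q with rfl | ⟨q, x, rfl⟩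
    · intro z hz hre
      have hcl' : ∀ u ∈ V, ∀ y, PvStep u y → y ∈ V :=
        fun u hu => (hcl u hu (List.not_mem_nil)).2
      have hmem := pvClosed hcl' z e hz hre
      exact (hcl e hmem (List.not_mem_nil)).1 rfl
    · simp only [pvLoop, PySem.List.pop?_last] at hloop
      by_cases hxe : x = e
      · rw [if_pos hxe] at hloop; cases hloop
      · rw [if_neg hxe] at hloop
        have hxQ : x ∈ q ++ [x] := List.mem_append_right _ (List.mem_singleton.2 rfl)
        have hxV : x ∈ V := hQV x hxQ
        have hsize := pvFold_size x (PySem.List.pyRange 0 ((x.length : Int) - 1) 1) (V, q)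
        have hinv1 : ∀ y ∈ (pvExpand x (V, q)).2, y ∈ (pvExpand x (V, q)).1 := by
          rw [pvExpand_eq]
          exact pvFold_qv x _ (V, q) (fun y hy => hQV y (List.mem_append_left _ hy))
        have hinv2 : (pvExpand x (V, q)).1.Nodup := by
          rw [pvExpand_eq]; exact pvFold_nodup x _ (V, q) hnd
        have hinv3 : ∀ y ∈ (pvExpand x (V, q)).1, y.Perm s0 := by
          rw [pvExpand_eq]
          intro y hy
          rcases pvFold_v_src x _ (V, q) y hy with hy' | ⟨i, hi, happ, rfl⟩
          · exact hperm y hy'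
          · exact ((pvStep_perm (pvNewS_step hi happ)).symm).trans (hperm x hxV)
        have hinv4 : ∀ y ∈ (pvExpand x (V, q)).1, y ∉ (pvExpand x (V, q)).2 →
            y ≠ e ∧ ∀ z, PvStep y z → z ∈ (pvExpand x (V, q)).1 := by
          intro y hy hyQ'
          rw [pvExpand_eq] at hy hyQ' ⊢
          rcases pvFold_v_in_q x _ (V, q) y hy with hyV | hyQ
          · by_cases hyx : y = x
            · refine ⟨by rw [hyx]; exact hxe, ?_⟩
              intro z hz
              rw [hyx] at hz
              rcases pvStep_newS hz with ⟨i, hi, happ, rfl⟩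
              exact pvFold_complete x _ (V, q) i hi happ
            · have hyq : y ∉ q := fun hq =>
                hyQ' (pvFold_mono_q x _ (V, q) y hq)
              have hyQ0 : y ∉ q ++ [x] := by
                simp only [List.mem_append, List.mem_singleton]
                rintro (h | h)
                · exact hyq h
                · exact hyx h
              obtain ⟨hne, hsucc⟩ := hcl y hyV hyQ0
              exact ⟨hne, fun z hz => pvFold_mono_v x _ (V, q) z (hsucc z hz)⟩
          · exact absurd hyQ hyQ'
        have hinv5 : Nat.factorial s0.length + 1 + (pvExpand x (V, q)).2.length
            ≤ fuel + (pvExpand x (V, q)).1.length := by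
          rw [pvExpand_eq]
          simp only [List.length_append, List.length_cons, List.length_nil] at hfuel
          simp only at hsize
          omega
        intro z hz
        exact ih _ _ e s0 hinv1 hinv2 hinv3 hinv4 hinv5 hloop z
          (by rw [pvExpand_eq]; exact pvFold_mono_v x _ (V, q) z hz)

-- ---- B in terms of the condition ----
theorem pvAlt_iff (start end_ : String) : canTransform_bfs_TLE_alt start end_ = true ↔
    (start.toList.length = end_.toList.length ∧
     List.Forall₂ pvOkP (pvNonX 0 start.toList) (pvNonX 0 end_.toList)) := by
  unfold canTransform_bfs_TLE_alt
  simp only [pvTokens, pvTokens_eq]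
  split_ifs with h1 h2
  · constructor
    · intro h; cases h
    · rintro ⟨hl, -⟩; exact absurd hl h1
  · constructor
    · intro h; cases h
    · rintro ⟨-, hf⟩; exact absurd (List.Forall₂.length_eq hf) h2
  · rw [pvCheck_iff _ _ (not_not.1 h2)]
    constructor
    · intro h; exact ⟨not_not.1 h1, h⟩
    · rintro ⟨-, hf⟩; exact hf

-- ===== VERDICT (by name: the statement is the Claim_ definition above) =====
theorem pvOfList_singleton (s0 : List Char) : PySem.Set.ofList [s0] = [s0] := by
  simp [PySem.Set.ofList, PySem.Set.add]

theorem canTransform_bfs_TLE_spec : Claim_equal_canTransform_bfs_TLE := by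
  intro start end_ _
  unfold Spec_canTransform_bfs_TLE
  by_cases halt : canTransform_bfs_TLE_alt start end_ = true
  · obtain ⟨hlen, hF⟩ := (pvAlt_iff start end_).1 halt
    have hreach : PvReach start.toList end_.toList :=
      pvSuff start.toList.length 0 start.toList end_.toList rfl hlen.symm hF
    rw [halt]
    unfold canTransform_bfs_TLE
    rcases Bool.eq_false_or_eq_true
        (pvLoop (Nat.factorial start.toList.length + 1)
          (PySem.Set.ofList [start.toList]) [start.toList] end_.toList) with h | h
    · exact h
    · exfalso
      rw [pvOfList_singleton] at h
      exact pvLoop_false _ _ _ _ start.toList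
        (fun x hx => hx) (List.nodup_singleton _)
        (fun x hx => by rw [List.mem_singleton.1 hx])
        (fun x hx hnx => absurd hx hnx)
        (by simp) h start.toList (List.mem_singleton.2 rfl) hreach
  · have halt' : canTransform_bfs_TLE_alt start end_ = false := by
      rcases Bool.eq_false_or_eq_true (canTransform_bfs_TLE_alt start end_) with h | h
      · exact absurd h halt
      · exact h
    rw [halt']
    unfold canTransform_bfs_TLE
    rcases Bool.eq_false_or_eq_true
        (pvLoop (Nat.factorial start.toList.length + 1)
          (PySem.Set.ofList [start.toList]) [start.toList] end_.toList) with h | h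
    · exfalso
      have hreach := pvLoop_true _ _ _ end_.toList start.toList
        (fun x hx => by rw [List.mem_singleton.1 hx]; exact Relation.ReflTransGen.refl) h
      obtain ⟨hl, hf⟩ := pvReach_cond hreach
      exact halt ((pvAlt_iff start end_).2 ⟨hl, hf⟩)
    · exact h
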